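-- pv_equiv track=rewrite | github.com/c-mita/AoC | 2025/03.py | largest_battery_pair
-- ===== SOURCE A (Python) =====
-- def largest_battery_pair(bank):
--     first = 0
--     second = 0
--     idx = 0
--     for n, v in enumerate(bank[:-1]):
--         if v > first:
--             first = v
--             idx = n
--     for n, v in enumerate(bank[idx+1:]):
--         if v > second:
--             second = v
--     return first, second
-- ===== SOURCE B (Python) =====
-- def largest_battery_pair(bank):
--     first = 0
--     idx = 0
--     second = 0
--     last = len(bank) - 1
--     for i, v in enumerate(bank):
--         if i < last and v > first:
--             first = v
--             idx = i
--             second = 0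
--         elif i > idx and v > second:
--             second = v
--     return first, second
-- ===== Notes on version B (the rewrite author's own statement) =====
-- stated objective: alternative
-- what changed: Replaced A's two sequential scans (find clamped max+index over bank[:-1], then rescan bank[idx+1:] for the clamped second max) by one single-pass loop over enumerate(bank) maintaining (first, idx, second), resetting second whenever first moves.
import Mathlib
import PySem

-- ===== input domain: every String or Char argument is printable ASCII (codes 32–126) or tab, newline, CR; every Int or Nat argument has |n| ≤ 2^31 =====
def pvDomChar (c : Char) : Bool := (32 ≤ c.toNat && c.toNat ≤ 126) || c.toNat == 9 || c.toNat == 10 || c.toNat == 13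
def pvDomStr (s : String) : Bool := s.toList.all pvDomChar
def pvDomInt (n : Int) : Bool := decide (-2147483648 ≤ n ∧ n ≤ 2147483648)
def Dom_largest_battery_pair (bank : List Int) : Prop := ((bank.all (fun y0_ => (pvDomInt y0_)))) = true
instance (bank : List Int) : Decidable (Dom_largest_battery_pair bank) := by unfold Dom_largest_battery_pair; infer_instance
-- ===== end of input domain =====

-- B merges A's two sequential scans into one single-pass loop over enumerate(bank)
-- maintaining (first, idx, second); same values, one traversal (objective: alternative).

-- ===== PORT A =====
def largest_battery_pair (bank : List Int) : Int × Int :=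
  -- first loop: for n, v in enumerate(bank[:-1])
  let s1 := (PySem.List.enumerate (PySem.List.slice bank none (some (-1)))).foldl
      (fun (st : Int × Int) nv => if nv.2 > st.1 then (nv.2, nv.1) else st) (0, 0)
  -- second loop: for n, v in enumerate(bank[idx+1:])
  let second := (PySem.List.enumerate (PySem.List.slice bank (some (s1.2 + 1)) none)).foldl
      (fun (s : Int) nv => if nv.2 > s then nv.2 else s) 0
  (s1.1, second)

-- ===== PORT B =====
def largest_battery_pair_alt (bank : List Int) : Int × Int :=
  let last : Int := (bank.length : Int) - 1
  let st := (PySem.List.enumerate bank).foldl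
      (fun (st : Int × Int × Int) nv =>
        if nv.1 < last ∧ nv.2 > st.1 then (nv.2, nv.1, 0)
        else if nv.1 > st.2.1 ∧ nv.2 > st.2.2 then (st.1, st.2.1, nv.2) else st)
      (0, 0, 0)
  (st.1, st.2.2)

-- ===== PRECONDITION & SPEC =====
def Spec_largest_battery_pair (bank : List Int) (out : Int × Int) : Prop := out = largest_battery_pair_alt bank
instance (bank : List Int) (out : Int × Int) : Decidable (Spec_largest_battery_pair bank out) := by unfold Spec_largest_battery_pair; infer_instance

-- ===== CLAIM (what is proved, stated in full; the proofs are below) =====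
def Claim_equal_largest_battery_pair : Prop := ∀ (bank : List Int), Dom_largest_battery_pair bank → Spec_largest_battery_pair bank (largest_battery_pair bank)

-- ===== LEMMAS AND PROOFS =====

-- A's first loop, as a named step/fold (definitionally the lambda in the port)
def pvStep1 (st : Int × Int) (nv : Int × Int) : Int × Int :=
  if nv.2 > st.1 then (nv.2, nv.1) else st

def pvLoopA (xs : List Int) : Int × Int := (PySem.List.enumerate xs).foldl pvStep1 (0, 0)

def pvMStep (s v : Int) : Int := if v > s then v else s

-- B's step with the (always-true on a proper prefix) length test removed
def pvStepNC (st : Int × Int × Int) (nv : Int × Int) : Int × Int × Int :=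
  if nv.2 > st.1 then (nv.2, nv.1, 0)
  else if nv.1 > st.2.1 ∧ nv.2 > st.2.2 then (st.1, st.2.1, nv.2) else st

-- A's second loop ignores the enumerate index
theorem fold2_enum (xs : List Int) (s0 : Int) (k : Int) :
    (PySem.List.enumerate xs k).foldl (fun (s : Int) nv => if nv.2 > s then nv.2 else s) s0
      = xs.foldl pvMStep s0 := by
  induction xs generalizing s0 k with
  | nil => simp [PySem.List.enumerate_nil]
  | cons x xs ih => simp [PySem.List.enumerate_cons, pvMStep, List.foldl_cons, ih]

theorem loopA_append (ws : List Int) (w : Int) :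
    pvLoopA (ws ++ [w]) = pvStep1 (pvLoopA ws) ((ws.length : Int), w) := by
  simp [pvLoopA, PySem.List.enumerate_append, PySem.List.enumerate_cons,
    PySem.List.enumerate_nil, List.foldl_append]

-- index bound of A's first loop
theorem loopA_bound (ws : List Int) :
    0 ≤ (pvLoopA ws).2 ∧ (pvLoopA ws).2 ≤ max 0 ((ws.length : Int) - 1) := by
  induction ws using List.reverseRecOn with
  | nil => simp [pvLoopA, PySem.List.enumerate_nil]
  | append_singleton ws w ih =>
    rw [loopA_append]
    unfold pvStep1
    split
    · constructor
      · positivity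
      · simp only [List.length_append, List.length_cons, List.length_nil]
        push_cast
        omega
    · refine ⟨ih.1, le_trans ih.2 ?_⟩
      simp only [List.length_append, List.length_cons, List.length_nil]
      push_cast
      omega

-- core invariant: the unconditioned single pass computes A's (first, idx) and
-- the clamped max of the suffix after idx
theorem core (ys : List Int) :
    (PySem.List.enumerate ys).foldl pvStepNC (0, 0, 0)
      = ((pvLoopA ys).1, (pvLoopA ys).2,
          (ys.drop ((pvLoopA ys).2 + 1).toNat).foldl pvMStep 0) := by
  induction ys using List.reverseRecOn with
  | nil => simp [pvLoopA, PySem.List.enumerate_nil]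
  | append_singleton ws w ih =>
    have hb := loopA_bound ws
    rw [loopA_append]
    rw [show PySem.List.enumerate (ws ++ [w]) = PySem.List.enumerate ws ++ [((ws.length : Int), w)] by
      simp [PySem.List.enumerate_append, PySem.List.enumerate_cons, PySem.List.enumerate_nil]]
    rw [List.foldl_append, ih]
    unfold pvStep1 pvStepNC
    by_cases h1 : w > (pvLoopA ws).1
    · simp [h1]
    · simp only [h1, if_false]
      rcases Nat.eq_zero_or_pos ws.length with hlen | hlen
      · -- ws = [] : index 0 is not > idx 0
        have hws : ws = [] := List.eq_nil_of_length_eq_zero hlen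
        subst hws
        simp only [pvLoopA, PySem.List.enumerate_nil, List.foldl_nil] at h1 ⊢
        simp [h1]
      · have hidx : (pvLoopA ws).2 < (ws.length : Int) := by
          rcases hb with ⟨h0, h2⟩; omega
        have htn : ((pvLoopA ws).2 + 1).toNat ≤ ws.length := by omega
        have hdrop : (ws ++ [w]).drop ((pvLoopA ws).2 + 1).toNat
            = ws.drop ((pvLoopA ws).2 + 1).toNat ++ [w] := by
          rw [List.drop_append_of_le_length htn]
        by_cases h2 : w > (ws.drop ((pvLoopA ws).2 + 1).toNat).foldl pvMStep 0
        · rw [hdrop, List.foldl_append]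
          simp [pvMStep, h2, hidx]
          exact fun h => absurd h h1
        · rw [hdrop, List.foldl_append]
          simp [pvMStep, h2, hidx]
          exact fun h => absurd h h1

-- characterisation of port A
theorem portA_eq (bank : List Int) :
    largest_battery_pair bank
      = ((pvLoopA bank.dropLast).1,
          (bank.drop ((pvLoopA bank.dropLast).2 + 1).toNat).foldl pvMStep 0) := by
  simp only [largest_battery_pair]
  rw [PySem.List.slice_to_neg_one]
  have h0 : 0 ≤ (pvLoopA bank.dropLast).2 + 1 := by
    have := (loopA_bound bank.dropLast).1; omega
  rw [show ((PySem.List.enumerate bank.dropLast).foldl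
      (fun (st : Int × Int) nv => if nv.2 > st.1 then (nv.2, nv.1) else st) (0, 0))
      = pvLoopA bank.dropLast from rfl]
  rw [PySem.List.slice_from _ h0, fold2_enum]

theorem largest_battery_pair_eq_alt (bank : List Int) :
    largest_battery_pair bank = largest_battery_pair_alt bank := by
  induction bank using List.reverseRecOn with
  | nil =>
    simp [largest_battery_pair_alt, PySem.List.enumerate_nil, portA_eq, pvLoopA]
  | append_singleton ys z _ih =>
    rw [portA_eq]
    simp only [largest_battery_pair_alt]
    rw [show PySem.List.enumerate (ys ++ [z]) = PySem.List.enumerate ys ++ [((ys.length : Int), z)] by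
      simp [PySem.List.enumerate_append, PySem.List.enumerate_cons, PySem.List.enumerate_nil]]
    rw [List.foldl_append]
    have hlast : ((ys ++ [z]).length : Int) - 1 = (ys.length : Int) := by simp
    -- on the proper prefix the length test is always true
    have hpre : (PySem.List.enumerate ys).foldl
        (fun (st : Int × Int × Int) nv =>
          if nv.1 < ((ys ++ [z]).length : Int) - 1 ∧ nv.2 > st.1 then (nv.2, nv.1, 0)
          else if nv.1 > st.2.1 ∧ nv.2 > st.2.2 then (st.1, st.2.1, nv.2) else st) (0, 0, 0)
        = (PySem.List.enumerate ys).foldl pvStepNC (0, 0, 0) := by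
      apply PySem.List.foldl_congr_mem
      intro st nv hmem
      rcases (PySem.List.mem_enumerate_iff _ _ _).1 hmem with ⟨k, hk, rfl⟩
      have : (0 : Int) + k < ((ys ++ [z]).length : Int) - 1 := by
        simp only [List.length_append, List.length_cons, List.length_nil]
        push_cast
        omega
      simp only [this, true_and, pvStepNC]
    rw [hpre, core]
    have hb := loopA_bound ys
    have hdl : (ys ++ [z]).dropLast = ys := by simp
    rw [hdl]
    -- the last step: the length test fails, the elif applies
    have hnot : ¬ ((ys.length : Int) < ((ys ++ [z]).length : Int) - 1 ∧ z > (pvLoopA ys).1) := by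
      intro hc
      have h := hc.1
      simp only [List.length_append, List.length_cons, List.length_nil] at h
      omega
    simp only [List.foldl_cons, List.foldl_nil]
    rw [if_neg hnot]
    rcases Nat.eq_zero_or_pos ys.length with hlen | hlen
    · have hys : ys = [] := List.eq_nil_of_length_eq_zero hlen
      subst hys
      simp [pvLoopA, PySem.List.enumerate_nil]
    · have hidx : (pvLoopA ys).2 < (ys.length : Int) := by
        rcases hb with ⟨h0, h2⟩; omega
      have htn : ((pvLoopA ys).2 + 1).toNat ≤ ys.length := by
        rcases hb with ⟨h0, _⟩; omega
      have hdrop : (ys ++ [z]).drop ((pvLoopA ys).2 + 1).toNat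
          = ys.drop ((pvLoopA ys).2 + 1).toNat ++ [z] := by
        rw [List.drop_append_of_le_length htn]
      rw [hdrop, List.foldl_append]
      by_cases h2 : z > (ys.drop ((pvLoopA ys).2 + 1).toNat).foldl pvMStep 0
      · simp only [hidx, h2, and_self, if_pos]
        simp [pvMStep, h2]
      · have : ¬ ((ys.length : Int) > (pvLoopA ys).2 ∧ z > (ys.drop ((pvLoopA ys).2 + 1).toNat).foldl pvMStep 0) := by
          intro hc; exact h2 hc.2
        simp only [this, if_false]
        simp [pvMStep, h2]

-- ===== VERDICT (by name: the statement is the Claim_ definition above) =====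
theorem largest_battery_pair_spec : Claim_equal_largest_battery_pair := by
  intro bank _
  unfold Spec_largest_battery_pair
  exact largest_battery_pair_eq_alt bank
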